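-- pv_equiv track=rewrite | github.com/jbarciv/LegoMasters | HMI/main.py | planificador_carga
-- ===== SOURCE A (Python) =====
-- PIEZAS_TOTAL = {
--     "P1": {"Joints": [166,-109.71,-87.73,-72.22,88.69,232.80],"Color": "yellow" },
--     "P2": {"Joints": [162.94,-96.7,-104.34,-68.56,88.67,229.74],"Color": "yellow"},
--     "P3": {"Joints": [158.6,-84.55,-116.66,-68.29,88.68,225.43],"Color": "white"},
--     "P4": {"Joints": [151.67,-72.66,-125.74,-70.96,88.68,218.52],"Color": "white"},
--     "P5": { "Joints": [140.94,-63.69,-130.81,-74.66,88.78,207.81],"Color": "green"},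
--     "P6": {"Joints": [155.25,-121.61,-69.88,-77.94,88.79,222.06],"Color": "orange"},
--     "P7": {"Joints": [150.94,-110.24,-87.12,-71.99,88.8,217.74],"Color": "yellow"},
--     "P8": {"Joints": [145.01,-100.37,-100.17,-68.7,88.84,211.8],"Color": "white"},
--     "P9": {"Joints": [137.38,-92.68,-108.96,-67.45,88.92,204.19],"Color": "white"},
--     "P10": {"Joints": [127.43,-87.52,-114.19,-67.23,89.06,194.24],"Color": "green"},
--     "P11": {"Joints": [146.61,-138.02,-41.53,-89.72,88.91,213.44],"Color": "blue" },
--     "P12": {"Joints": [141.74,-125.37,-63.82,-79.99,88.94,208.55],"Color": "red" },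
--     "P13": {"Joints": [135.67,-116.49,-78.05,-74.53,89.01,202.46],"Color": "red" },
--     "P14": {"Joints": [128.49,-110.31,-87.18,-71.47,89.11,195.28],"Color": "red" },
--     "P15": {"Joints": [119.72,-106.68,-92.32,-69.64,89.26,186.52],"Color": "green" },
--     "P16": {"Joints": [128.55,-137.1,-43.33,-88.52,89.18,195.37],"Color": "none" },
--     "P17": {"Joints": [122.03,-130.17,-55.77,-82.94,89.28,188.83],"Color": "none" },
--     "P18": {"Joints": [114.45,-126.29,-62.44,-80.06,89.42,181.25],"Color": "blue"},
--     "P19": {"Joints": [121.86,-67.94,-128.75,-72.18,89.11,188.71],"Color": "none" },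
--     "P20": {"Joints": [111.79,-96.26,-105.19,-67.31,89.39,178.59],"Color": "none" },
--     "P21": {"Joints": [107.06,-120.3,-72.26,-76.17,89.55,173.85],"Color": "none" }
-- }
--
-- def planificador_carga(colores):
--     seleccion_piezas=[]
--     for i in range(len(colores)):
--         color_deseado = colores[i]
--         piezas_del_color = []
--         for pieza_clave, atributos in PIEZAS_TOTAL.items():
--             if isinstance(atributos, dict) and "Color" in atributos and atributos["Color"] == color_deseado:
--                 piezas_del_color.append(pieza_clave)
--         for _ in range(len(seleccion_piezas)):
--             if piezas_del_color and piezas_del_color[0] in seleccion_piezas: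
--                 piezas_del_color.remove(piezas_del_color[0])
--         if piezas_del_color:
--             seleccion_piezas.append(piezas_del_color[0])
--     return seleccion_piezas
-- ===== SOURCE B (Python) =====
-- PIEZAS_TOTAL = {
--     "P1": {"Joints": [166,-109.71,-87.73,-72.22,88.69,232.80],"Color": "yellow" },
--     "P2": {"Joints": [162.94,-96.7,-104.34,-68.56,88.67,229.74],"Color": "yellow"},
--     "P3": {"Joints": [158.6,-84.55,-116.66,-68.29,88.68,225.43],"Color": "white"},
--     "P4": {"Joints": [151.67,-72.66,-125.74,-70.96,88.68,218.52],"Color": "white"},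
--     "P5": { "Joints": [140.94,-63.69,-130.81,-74.66,88.78,207.81],"Color": "green"},
--     "P6": {"Joints": [155.25,-121.61,-69.88,-77.94,88.79,222.06],"Color": "orange"},
--     "P7": {"Joints": [150.94,-110.24,-87.12,-71.99,88.8,217.74],"Color": "yellow"},
--     "P8": {"Joints": [145.01,-100.37,-100.17,-68.7,88.84,211.8],"Color": "white"},
--     "P9": {"Joints": [137.38,-92.68,-108.96,-67.45,88.92,204.19],"Color": "white"},
--     "P10": {"Joints": [127.43,-87.52,-114.19,-67.23,89.06,194.24],"Color": "green"},
--     "P11": {"Joints": [146.61,-138.02,-41.53,-89.72,88.91,213.44],"Color": "blue" },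
--     "P12": {"Joints": [141.74,-125.37,-63.82,-79.99,88.94,208.55],"Color": "red" },
--     "P13": {"Joints": [135.67,-116.49,-78.05,-74.53,89.01,202.46],"Color": "red" },
--     "P14": {"Joints": [128.49,-110.31,-87.18,-71.47,89.11,195.28],"Color": "red" },
--     "P15": {"Joints": [119.72,-106.68,-92.32,-69.64,89.26,186.52],"Color": "green" },
--     "P16": {"Joints": [128.55,-137.1,-43.33,-88.52,89.18,195.37],"Color": "none" },
--     "P17": {"Joints": [122.03,-130.17,-55.77,-82.94,89.28,188.83],"Color": "none" },
--     "P18": {"Joints": [114.45,-126.29,-62.44,-80.06,89.42,181.25],"Color": "blue"},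
--     "P19": {"Joints": [121.86,-67.94,-128.75,-72.18,89.11,188.71],"Color": "none" },
--     "P20": {"Joints": [111.79,-96.26,-105.19,-67.31,89.39,178.59],"Color": "none" },
--     "P21": {"Joints": [107.06,-120.3,-72.26,-76.17,89.55,173.85],"Color": "none" }
-- }
--
-- def planificador_carga(colores):
--     # Precompute, once, an index from color to its ordered list of piece keys;
--     # then each request is a direct lookup plus a scan for the first unused key.
--     index = {}
--     for pieza_clave, atributos in PIEZAS_TOTAL.items():
--         c = atributos["Color"]
--         index[c] = index.get(c, []) + [pieza_clave]
--     usados = set()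
--     seleccion = []
--     for color in colores:
--         for clave in index.get(color, []):
--             if clave not in usados:
--                 seleccion.append(clave)
--                 usados.add(clave)
--                 break
--     return seleccion
-- ===== Notes on version B (the rewrite author's own statement) =====
-- stated objective: faster
-- what changed: B builds a color->keys index dict in one pass over PIEZAS_TOTAL and keeps a 'used' set, answering each requested color by a direct lookup plus a scan for the first unused key, replacing A's per-request full rescan of PIEZAS_TOTAL and its len(seleccion)-iteration head-removal loop.
import Mathlib
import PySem

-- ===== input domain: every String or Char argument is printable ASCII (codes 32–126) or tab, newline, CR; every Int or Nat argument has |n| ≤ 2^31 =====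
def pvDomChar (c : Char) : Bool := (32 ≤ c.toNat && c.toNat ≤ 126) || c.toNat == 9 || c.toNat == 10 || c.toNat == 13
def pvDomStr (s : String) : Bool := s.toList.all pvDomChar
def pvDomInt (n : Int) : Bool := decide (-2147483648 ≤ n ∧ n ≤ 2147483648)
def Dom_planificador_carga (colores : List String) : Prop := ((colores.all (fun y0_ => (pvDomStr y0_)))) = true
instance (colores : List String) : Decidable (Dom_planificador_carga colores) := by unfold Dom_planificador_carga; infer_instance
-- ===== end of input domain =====

-- B replaces A's per-request rescan of PIEZAS_TOTAL plus its len(seleccion)-iteration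
-- head-removal loop by a one-time color→keys index and a 'used' set (objective: faster).

-- ===== PORT A =====
-- PIEZAS_TOTAL, ported as its (key, Color) items in insertion order: the "Joints" floats are
-- never read by planificador_carga, and on this literal dict the 'isinstance(atributos, dict)'
-- and '"Color" in atributos' guards are always True, so the filter keeps exactly Color == c.
def piezasTotal : List (String × String) :=
  [("P1","yellow"), ("P2","yellow"), ("P3","white"), ("P4","white"), ("P5","green"),
   ("P6","orange"), ("P7","yellow"), ("P8","white"), ("P9","white"), ("P10","green"),
   ("P11","blue"), ("P12","red"), ("P13","red"), ("P14","red"), ("P15","green"),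
   ("P16","none"), ("P17","none"), ("P18","blue"), ("P19","none"), ("P20","none"),
   ("P21","none")]

-- 'for _ in range(len(seleccion_piezas)): if piezas_del_color and piezas_del_color[0] in
-- seleccion_piezas: piezas_del_color.remove(piezas_del_color[0])' — removing the value at
-- index 0 removes its first occurrence, i.e. the tail.
def pcRemoveLoop : Nat → List String → List String → List String
  | 0, _, pdc => pdc
  | Nat.succ m, sel, [] => pcRemoveLoop m sel []
  | Nat.succ m, sel, h :: t => pcRemoveLoop m sel (if sel.contains h then t else h :: t)

def planificador_carga (colores : List String) : List String :=
  colores.foldl (fun sel c =>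
    let pdc := (piezasTotal.filter (fun kv => kv.2 == c)).map (fun kv => kv.1)
    let pdc2 := pcRemoveLoop sel.length sel pdc
    match pdc2 with
    | [] => sel
    | h :: _ => sel ++ [h]) []

-- ===== PORT B =====
-- index[c] = index.get(c, []) + [pieza_clave], one pass over PIEZAS_TOTAL
def pcIndex : PySem.Dict String (List String) :=
  piezasTotal.foldl (fun d kv => d.modify kv.2 [] (fun l => l ++ [kv.1])) PySem.Dict.empty

-- the inner 'for clave in index.get(color, []): if clave not in usados: …; break'
-- is the first indexed key not in usados
def planificador_carga_alt (colores : List String) : List String :=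
  (colores.foldl (fun st c =>
      match (pcIndex.getD c []).find? (fun k => !(PySem.Set.contains st.2 k)) with
      | some k => (st.1 ++ [k], PySem.Set.add st.2 k)
      | none => st)
    (([], PySem.Set.empty) : List String × PySem.Set String)).1

-- ===== PRECONDITION & SPEC =====
def Spec_planificador_carga (colores : List String) (out : List String) : Prop := out = planificador_carga_alt colores
instance (colores : List String) (out : List String) : Decidable (Spec_planificador_carga colores out) := by unfold Spec_planificador_carga; infer_instance

-- ===== CLAIM (what is proved, stated in full; the proofs are below) =====
def Claim_equal_planificador_carga : Prop := ∀ (colores : List String), Dom_planificador_carga colores → Spec_planificador_carga colores (planificador_carga colores)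

-- ===== LEMMAS AND PROOFS =====

-- one step of A's outer loop (definitionally the lambda inside planificador_carga)
def pcStepA (sel : List String) (c : String) : List String :=
  match pcRemoveLoop sel.length sel
      ((piezasTotal.filter (fun kv => kv.2 == c)).map (fun kv => kv.1)) with
  | [] => sel
  | h :: _ => sel ++ [h]

-- one step of B's loop (definitionally the lambda inside planificador_carga_alt)
def pcStepB (st : List String × PySem.Set String) (c : String) : List String × PySem.Set String :=
  match (pcIndex.getD c []).find? (fun k => !(PySem.Set.contains st.2 k)) with
  | some k => (st.1 ++ [k], PySem.Set.add st.2 k)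
  | none => st

-- B's index lookup returns exactly A's filtered key list, for every color string.
theorem getD_foldl_modify_append_swap (l : List (String × String))
    (d : PySem.Dict String (List String)) (c : String) :
    (l.foldl (fun d kv => d.modify kv.2 [] (fun v => v ++ [kv.1])) d).getD c []
      = d.getD c [] ++ (l.filter (fun kv => kv.2 == c)).map (fun kv => kv.1) := by
  induction l generalizing d with
  | nil => simp
  | cons kv rest ih =>
      simp only [List.foldl_cons, ih, List.filter_cons]
      by_cases hc : kv.2 = c
      · subst hc
        simp
      · have hb : (kv.2 == c) = false := beq_eq_false_iff_ne.mpr hc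
        simp [PySem.Dict.getD_modify, hb, Ne.symm hc]

theorem pcIndex_getD (c : String) :
    pcIndex.getD c [] = (piezasTotal.filter (fun kv => kv.2 == c)).map (fun kv => kv.1) := by
  simpa using getD_foldl_modify_append_swap piezasTotal PySem.Dict.empty c

theorem pdc_nodup (c : String) :
    ((piezasTotal.filter (fun kv => kv.2 == c)).map (fun kv => kv.1)).Nodup := by
  have hkeys : (piezasTotal.map (fun kv => kv.1)).Nodup := by decide
  exact hkeys.sublist (List.Sublist.map _ List.filter_sublist)

theorem pcRemoveLoop_nil : ∀ (n : Nat) (sel : List String), pcRemoveLoop n sel [] = []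
  | 0, _ => rfl
  | Nat.succ m, sel => pcRemoveLoop_nil m sel

theorem pcRemoveLoop_stuck (n : Nat) (sel : List String) (h : String) (t : List String)
    (hh : sel.contains h = false) : pcRemoveLoop n sel (h :: t) = h :: t := by
  induction n with
  | zero => rfl
  | succ m ih =>
      show pcRemoveLoop m sel (if sel.contains h then t else h :: t) = h :: t
      have hne : ¬ (sel.contains h = true) := by rw [hh]; exact Bool.false_ne_true
      rw [if_neg hne]
      exact ih

theorem pcRemoveLoop_dropWhile (n : Nat) (sel : List String) (l : List String)
    (hn : (l.takeWhile (fun x => sel.contains x)).length ≤ n) :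
    pcRemoveLoop n sel l = l.dropWhile (fun x => sel.contains x) := by
  induction n generalizing l with
  | zero =>
      cases l with
      | nil => rfl
      | cons h t =>
          rw [List.takeWhile_cons] at hn
          cases hh : sel.contains h with
          | true => rw [hh] at hn; simp at hn
          | false => rw [List.dropWhile_cons, hh]; rfl
  | succ m ih =>
      cases l with
      | nil => rw [pcRemoveLoop_nil]; rfl
      | cons h t =>
          cases hh : sel.contains h with
          | true =>
              have hstep : pcRemoveLoop (m + 1) sel (h :: t) = pcRemoveLoop m sel t := by
                show pcRemoveLoop m sel (if sel.contains h then t else h :: t) = _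
                rw [if_pos hh]
              have hn' : (t.takeWhile (fun x => sel.contains x)).length ≤ m := by
                rw [List.takeWhile_cons, hh] at hn
                simpa using Nat.le_of_succ_le_succ hn
              rw [hstep, ih t hn', List.dropWhile_cons, hh]
              rfl
          | false =>
              rw [pcRemoveLoop_stuck _ _ _ _ hh, List.dropWhile_cons, hh]
              rfl

theorem takeWhile_len_le (sel l : List String) (hl : l.Nodup) :
    (l.takeWhile (fun x => sel.contains x)).length ≤ sel.length := by
  have hnd : (l.takeWhile (fun x => sel.contains x)).Nodup :=
    hl.sublist (List.takeWhile_sublist _)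
  have hsub : (l.takeWhile (fun x => sel.contains x)) ⊆ sel := by
    intro x hx
    have := List.mem_takeWhile_imp hx
    simpa using this
  calc (l.takeWhile (fun x => sel.contains x)).length
      = (l.takeWhile (fun x => sel.contains x)).toFinset.card :=
        (List.toFinset_card_of_nodup hnd).symm
    _ ≤ sel.toFinset.card := Finset.card_le_card (fun x hx => by
        simp only [List.mem_toFinset] at *
        exact hsub hx)
    _ ≤ sel.length := sel.toFinset_card_le

theorem find?_not_eq_head?_dropWhile (p : String → Bool) (l : List String) :
    l.find? (fun x => !(p x)) = (l.dropWhile p).head? := by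
  induction l with
  | nil => rfl
  | cons h t ih =>
      by_cases hp : p h = true
      · simp [List.find?, List.dropWhile, hp, ih]
      · simp at hp
        simp [List.find?, List.dropWhile, hp]

theorem pcStep_eq (sel : List String) (used : PySem.Set String) (c : String)
    (hinv : ∀ x : String, x ∈ used ↔ x ∈ sel) :
    (pcStepB (sel, used) c).1 = pcStepA sel c ∧
      ∀ x : String, x ∈ (pcStepB (sel, used) c).2 ↔ x ∈ pcStepA sel c := by
  have hp : (fun k => !(PySem.Set.contains used k)) = (fun k => !(sel.contains k)) := by
    funext k
    have := hinv k
    simp [PySem.Set.contains, this]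
  unfold pcStepB pcStepA
  rw [pcIndex_getD, hp, find?_not_eq_head?_dropWhile,
    pcRemoveLoop_dropWhile sel.length sel _ (takeWhile_len_le _ _ (pdc_nodup c))]
  cases hc : List.dropWhile (fun x => sel.contains x)
      ((piezasTotal.filter (fun kv => kv.2 == c)).map (fun kv => kv.1)) with
  | nil => exact ⟨rfl, hinv⟩
  | cons h t =>
      refine ⟨rfl, fun x => ?_⟩
      simp [PySem.Set.mem_add, hinv x, or_comm]

theorem main_loop : ∀ (colores : List String) (sel : List String) (used : PySem.Set String),
    (∀ x : String, x ∈ used ↔ x ∈ sel) →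
    (colores.foldl pcStepB (sel, used)).1 = colores.foldl pcStepA sel := by
  intro colores
  induction colores with
  | nil => intro sel used _; rfl
  | cons c rest ih =>
      intro sel used hinv
      obtain ⟨h1, h2⟩ := pcStep_eq sel used c hinv
      rw [List.foldl_cons, List.foldl_cons,
        show pcStepB (sel, used) c = (pcStepA sel c, (pcStepB (sel, used) c).2) by
          rw [← h1]]
      exact ih (pcStepA sel c) _ h2

-- ===== VERDICT (by name: the statement is the Claim_ definition above) =====
theorem planificador_carga_spec : Claim_equal_planificador_carga := by
  intro colores _
  show planificador_carga colores = planificador_carga_alt colores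
  exact (main_loop colores [] PySem.Set.empty (fun _ => Iff.rfl)).symm
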